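-- pv_equiv track=rewrite | github.com/Nish2005karsh/neetcode-150-practice | companies/arrays.py | majorityGroup
-- ===== SOURCE A (Python) =====
-- from collections import Counter, defaultdict
--
-- def majorityGroup(s: str) -> str:
--     freq = Counter(s)
--
--     groups = defaultdict(list)
--     for ch, f in freq.items():
--         groups[f].append(ch)
--
--     # Find majority group
--     best_k, best_group = -1, []
--     for k, chars in groups.items():
--         if len(chars) > len(best_group) or (len(chars) == len(best_group) and k > best_k):
--             best_k, best_group = k, chars
--
--     return "".join(best_group)
-- ===== SOURCE B (Python) =====
-- from collections import Counter
--
-- def majorityGroup(s: str) -> str: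
--     freq = Counter(s)
--     # scan the sorted multiset of frequencies; equal frequencies are adjacent,
--     # so one run-length scan finds the frequency shared by the most characters
--     # (">=" lets a later, i.e. larger, frequency win ties)
--     best_f, best_len = 0, 0
--     run_f, run_len = None, 0
--     for v in sorted(freq.values()):
--         if v == run_f:
--             run_len += 1
--         else:
--             run_f, run_len = v, 1
--         if run_len >= best_len:
--             best_f, best_len = run_f, run_len
--     return "".join(ch for ch, f in freq.items() if f == best_f)
-- ===== Notes on version B (the rewrite author's own statement) =====
-- stated objective: alternative
-- what changed: A groups characters per frequency in a dict of lists and scans those groups with a best-so-far loop; B never builds groups: it sorts the multiset of frequency values and finds the longest run (ties to the larger value) by a single run-length scan, then filters the matching characters.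
import Mathlib
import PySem

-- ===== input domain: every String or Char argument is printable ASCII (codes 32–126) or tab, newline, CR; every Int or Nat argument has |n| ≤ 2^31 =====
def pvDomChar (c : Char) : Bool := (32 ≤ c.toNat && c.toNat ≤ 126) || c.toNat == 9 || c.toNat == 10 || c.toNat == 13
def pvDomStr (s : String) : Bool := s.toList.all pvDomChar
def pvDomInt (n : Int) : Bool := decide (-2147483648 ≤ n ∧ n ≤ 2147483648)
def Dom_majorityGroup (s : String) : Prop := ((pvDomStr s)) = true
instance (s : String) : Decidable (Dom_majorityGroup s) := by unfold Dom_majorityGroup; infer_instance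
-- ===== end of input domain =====

-- B never builds A's dict of per-frequency character lists: it sorts the multiset of
-- frequency values and finds the longest run by a single run-length scan (objective: alternative).

-- ===== PORT A =====
def majorityGroup (s : String) : String :=
  let freq := PySem.Dict.counter s.toList
  let groups : PySem.Dict Int (List Char) :=
    freq.items.foldl (fun d p => d.modify p.2 [] (fun l => l ++ [p.1])) PySem.Dict.empty
  let best :=
    groups.items.foldl
      (fun (b : Int × List Char) p =>
        if p.2.length > b.2.length ∨ (p.2.length = b.2.length ∧ p.1 > b.1) then (p.1, p.2) else b)
      ((-1 : Int), ([] : List Char))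
  String.mk best.2

-- ===== PORT B =====
-- one step of Source B's loop body over state (best_f, best_len, run_f, run_len)
def pvBStep (st : Int × Int × Option Int × Int) (v : Int) : Int × Int × Option Int × Int :=
  match st with
  | (bf, bl, rf, rl) =>
    let rl' : Int := if some v == rf then rl + 1 else 1
    if rl' ≥ bl then (v, rl', some v, rl') else (bf, bl, some v, rl')

def majorityGroup_alt (s : String) : String :=
  let freq := PySem.Dict.counter s.toList
  let st := (PySem.List.sorted freq.values (fun v => v) false).foldl pvBStep
      ((0 : Int), (0 : Int), (none : Option Int), (0 : Int))
  String.mk ((freq.items.filter (fun p => p.2 == st.1)).map (fun p => p.1))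

-- ===== PRECONDITION & SPEC =====
def Spec_majorityGroup (s : String) (out : String) : Prop := out = majorityGroup_alt s
instance (s : String) (out : String) : Decidable (Spec_majorityGroup s out) := by unfold Spec_majorityGroup; infer_instance

-- ===== CLAIM (what is proved, stated in full; the proofs are below) =====
def Claim_equal_majorityGroup : Prop := ∀ (s : String), Dom_majorityGroup s → Spec_majorityGroup s (majorityGroup s)

-- ===== LEMMAS AND PROOFS =====

-- A's best-so-far scan over the (key, group) pairs returns a pair (b, chars b) whose
-- (group size, key) is lexicographically maximal among the scanned keys.
lemma pv_afold (chars : Int → List Char) (K : List Int) (bk : Int) :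
    ∃ b : Int, (b = bk ∨ b ∈ K) ∧
      (K.map (fun k => (k, chars k))).foldl
          (fun (b : Int × List Char) p =>
            if p.2.length > b.2.length ∨ (p.2.length = b.2.length ∧ p.1 > b.1) then (p.1, p.2) else b)
          (bk, chars bk) = (b, chars b) ∧
      ∀ k, (k = bk ∨ k ∈ K) →
        ((chars k).length < (chars b).length ∨ ((chars k).length = (chars b).length ∧ k ≤ b)) := by
  induction K generalizing bk with
  | nil =>
    refine ⟨bk, Or.inl rfl, rfl, ?_⟩
    rintro k (rfl | h)
    · omega
    · cases h
  | cons k K ih =>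
    simp only [List.map_cons, List.foldl_cons]
    by_cases hc : (chars k).length > (chars bk).length ∨
        ((chars k).length = (chars bk).length ∧ k > bk)
    · rw [if_pos hc]
      obtain ⟨b, hbm, hfold, hall⟩ := ih k
      refine ⟨b, ?_, hfold, ?_⟩
      · rcases hbm with rfl | h
        · exact Or.inr (List.mem_cons_self)
        · exact Or.inr (List.mem_cons_of_mem _ h)
      · rintro j (rfl | hj)
        · have h1 := hall k (Or.inl rfl)
          omega
        · rcases List.mem_cons.mp hj with rfl | hj
          · exact hall j (Or.inl rfl)
          · exact hall j (Or.inr hj)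
    · rw [if_neg hc]
      obtain ⟨b, hbm, hfold, hall⟩ := ih bk
      refine ⟨b, ?_, hfold, ?_⟩
      · rcases hbm with rfl | h
        · exact Or.inl rfl
        · exact Or.inr (List.mem_cons_of_mem _ h)
      · rintro j (rfl | hj)
        · exact hall j (Or.inl rfl)
        · rcases List.mem_cons.mp hj with rfl | hj
          · have h1 := hall bk (Or.inl rfl)
            omega
          · exact hall j (Or.inr hj)

-- B's run-length scan over a sorted list returns as best_f a value whose
-- (multiplicity, value) is lexicographically maximal.
lemma pv_run (l : List Int) (hs : l.Pairwise (· ≤ ·)) :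
    (l = [] ∧ l.foldl pvBStep ((0:Int), (0:Int), (none : Option Int), (0:Int))
        = ((0:Int), (0:Int), (none : Option Int), (0:Int))) ∨
    ∃ bf bl u rl, l.foldl pvBStep ((0:Int), (0:Int), (none : Option Int), (0:Int))
        = (bf, bl, some u, rl) ∧
      u ∈ l ∧ (∀ w ∈ l, w ≤ u) ∧ rl = (l.count u : Int) ∧
      bf ∈ l ∧ bl = (l.count bf : Int) ∧
      ∀ w ∈ l, ((l.count w : Int) < bl ∨ ((l.count w : Int) = bl ∧ w ≤ bf)) := by
  induction l using List.reverseRecOn with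
  | nil => exact Or.inl ⟨rfl, rfl⟩
  | append_singleton l v ih =>
    have hmax : ∀ a ∈ l, a ≤ v := by
      intro a ha
      have := (List.pairwise_append.mp hs).2.2
      exact this a ha v (List.mem_singleton_self v)
    have hsl : l.Pairwise (· ≤ ·) := (List.pairwise_append.mp hs).1
    have hcnt : ∀ w : Int, (l ++ [v]).count w = l.count w + if v == w then 1 else 0 := by
      intro w
      simp [List.count_append, List.count_cons]
    rw [List.foldl_append]
    rcases ih hsl with ⟨rfl, hst⟩ | ⟨bf, bl, u, rl, hst, hu, humax, hrl, hbf, hbl, hall⟩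
    · rw [hst]
      refine Or.inr ⟨v, 1, v, 1, ?_, ?_, ?_, ?_, ?_, ?_, ?_⟩ <;>
        simp [pvBStep]
    · rw [hst]
      right
      by_cases hv : v = u
      · subst hv
        have hbeq : (some v == some v) = true := by simp
        have hcv : ((l ++ [v]).count v : Int) = (l.count v : Int) + 1 := by
          rw [hcnt]; simp
        by_cases hge : rl + 1 ≥ bl
        · refine ⟨v, rl + 1, v, rl + 1, ?_, ?_, ?_, ?_, ?_, ?_, ?_⟩
          · simp [pvBStep, hge]
          · exact List.mem_append_right _ (List.mem_singleton_self v)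
          · intro w hw
            rcases List.mem_append.mp hw with hw | hw
            · exact le_trans (hmax w hw) (le_refl v)
            · simp at hw; omega
          · omega
          · exact List.mem_append_right _ (List.mem_singleton_self v)
          · omega
          · intro w hw
            rcases List.mem_append.mp hw with hw | hw
            · by_cases hwv : w = v
              · subst hwv; omega
              · have h1 := hall w hw
                have h2 : (l ++ [v]).count w = l.count w := by
                  rw [hcnt]
                  simp [show ¬ (v = w) from fun h => hwv h.symm]
                have h3 := hmax w hw
                have h4 := humax w hw
                rw [h2]
                omega
            · simp at hw; subst hw; omega
        · -- run extended but still shorter than best: best unchanged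
          have hbfne : bf ≠ v := by
            intro h
            rw [h] at hbl
            omega
          refine ⟨bf, bl, v, rl + 1, ?_, ?_, ?_, ?_, ?_, ?_, ?_⟩
          · simp [pvBStep, hge]
          · exact List.mem_append_right _ (List.mem_singleton_self v)
          · intro w hw
            rcases List.mem_append.mp hw with hw | hw
            · exact hmax w hw
            · simp at hw; omega
          · omega
          · exact List.mem_append_left _ hbf
          · have : (l ++ [v]).count bf = l.count bf := by
              rw [hcnt]; simp [show ¬ (v = bf) from fun h => hbfne h.symm]
            rw [this]; exact hbl
          · intro w hw
            rcases List.mem_append.mp hw with hw | hw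
            · by_cases hwv : w = v
              · subst hwv
                rw [hcv]; omega
              · have h2 : (l ++ [v]).count w = l.count w := by
                  rw [hcnt]; simp [show ¬ (v = w) from fun h => hwv h.symm]
                rw [h2]; exact hall w hw
            · simp at hw; subst hw
              rw [hcv]; omega
      · -- new value v, strictly larger than everything in l
        have hvnotin : v ∉ l := by
          intro h
          exact hv (le_antisymm (humax v h) (hmax u hu))
        have hbeq : (some v == some u) = false := by simp [hv]
        have hcv : ((l ++ [v]).count v : Int) = 1 := by
          rw [hcnt]
          simp [List.count_eq_zero_of_not_mem hvnotin]
        have hcw : ∀ w ∈ l, (l ++ [v]).count w = l.count w := by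
          intro w hw
          rw [hcnt]
          simp [show ¬ (v = w) from fun h => hvnotin (h ▸ hw)]
        have hblpos : (1:Int) ≤ bl := by
          have : 1 ≤ l.count bf := List.one_le_count_iff.mpr hbf
          omega
        by_cases hge : (1:Int) ≥ bl
        · -- every group has size 1: v (the largest value) becomes best
          have hbl1 : bl = 1 := le_antisymm hge hblpos
          refine ⟨v, 1, v, 1, ?_, ?_, ?_, ?_, ?_, ?_, ?_⟩
          · simp [pvBStep, hv, hbl1]
          · exact List.mem_append_right _ (List.mem_singleton_self v)
          · intro w hw
            rcases List.mem_append.mp hw with hw | hw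
            · exact hmax w hw
            · simp at hw; omega
          · omega
          · exact List.mem_append_right _ (List.mem_singleton_self v)
          · omega
          · intro w hw
            rcases List.mem_append.mp hw with hw | hw
            · have h1 := hall w hw
              rw [hcw w hw]
              have := hmax w hw
              omega
            · simp at hw; subst hw; omega
        · -- best group of l is larger than the singleton run of v
          refine ⟨bf, bl, v, 1, ?_, ?_, ?_, ?_, ?_, ?_, ?_⟩
          · simp [pvBStep, hv]
            omega
          · exact List.mem_append_right _ (List.mem_singleton_self v)
          · intro w hw
            rcases List.mem_append.mp hw with hw | hw
            · exact hmax w hw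
            · simp at hw; omega
          · omega
          · exact List.mem_append_left _ hbf
          · rw [hcw bf hbf]; exact hbl
          · intro w hw
            rcases List.mem_append.mp hw with hw | hw
            · rw [hcw w hw]; exact hall w hw
            · simp at hw; subst hw
              rw [hcv]; omega

-- A's dict-of-groups scan and B's sorted-run scan select the same frequency, hence the
-- same characters; stated over the generic items list of the shared Counter.
lemma pv_main (its : List (Char × Int)) :
    String.mk
      (((its.foldl (fun d p => d.modify p.2 [] (fun l => l ++ [p.1]))
          (PySem.Dict.empty : PySem.Dict Int (List Char))).items.foldl
        (fun (b : Int × List Char) p =>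
          if p.2.length > b.2.length ∨ (p.2.length = b.2.length ∧ p.1 > b.1) then (p.1, p.2) else b)
        ((-1 : Int), ([] : List Char))).2)
    = String.mk ((its.filter (fun p =>
        p.2 == ((PySem.List.sorted (its.map (fun p => p.2)) (fun v => v) false).foldl pvBStep
          ((0:Int), (0:Int), (none : Option Int), (0:Int))).1)).map (fun p => p.1)) := by
  rcases its with _ | ⟨hd, tl⟩
  · rfl
  set its := hd :: tl with hits
  set chars : Int → List Char := fun k => (its.filter (fun p => p.2 == k)).map (fun p => p.1)
    with hchars
  set vals := its.map (fun p => p.2) with hvals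
  -- A's groups dict: items are (k, chars k) over the distinct frequencies
  have hfold : its.foldl (fun d p => d.modify p.2 [] (fun l => l ++ [p.1]))
      (PySem.Dict.empty : PySem.Dict Int (List Char))
      = (its.map (fun p => (p.2, p.1))).foldl (fun d q => d.modify q.1 [] (fun l => l ++ [q.2]))
        PySem.Dict.empty := by
    rw [List.foldl_map]
  have hgetD : ∀ k, (its.foldl (fun d p => d.modify p.2 [] (fun l => l ++ [p.1]))
      (PySem.Dict.empty : PySem.Dict Int (List Char))).getD k [] = chars k := by
    intro k
    rw [hfold, PySem.Dict.getD_foldl_modify_append]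
    simp [hchars, List.filter_map, Function.comp_def, List.map_map]
  have hnd : (its.foldl (fun d p => d.modify p.2 [] (fun l => l ++ [p.1]))
      (PySem.Dict.empty : PySem.Dict Int (List Char))).keys.Nodup := by
    rw [hfold]
    exact PySem.Dict.nodup_keys_foldl_modify_key _ (fun q : Int × Char => q.1) []
      (fun _ q l => l ++ [q.2]) _ PySem.Dict.nodup_keys_empty
  have hkeys : (its.foldl (fun d p => d.modify p.2 [] (fun l => l ++ [p.1]))
      (PySem.Dict.empty : PySem.Dict Int (List Char))).keys = PySem.Set.ofList vals := by
    rw [hfold, PySem.Dict.keys_foldl_modify_key _ (fun q : Int × Char => q.1) []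
      (fun _ q l => l ++ [q.2])]
    simp [PySem.Set.update, PySem.Set.ofList_eq_foldl, hvals, List.foldl_map]
  have hitems : (its.foldl (fun d p => d.modify p.2 [] (fun l => l ++ [p.1]))
      (PySem.Dict.empty : PySem.Dict Int (List Char))).items
      = (PySem.Set.ofList vals).map (fun k => (k, chars k)) := by
    rw [PySem.Dict.items_eq_map_keys _ hnd ([]), hkeys]
    exact List.map_congr_left (fun k _ => by rw [hgetD k])
  -- group sizes are multiplicities in vals
  have hlen : ∀ k, ((vals.count k : Nat) : Int) = ((chars k).length : Int) := by
    intro k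
    congr 1
    simp [hchars, hvals, ← List.countP_eq_length_filter, List.count, List.countP_map,
      Function.comp_def]
  rcases hK : PySem.Set.ofList vals with _ | ⟨k0, Kt⟩
  · exfalso
    have : hd.2 ∈ PySem.Set.ofList vals := by
      rw [PySem.Set.mem_ofList]
      exact List.mem_map_of_mem (List.mem_cons_self)
    rw [hK] at this
    exact List.not_mem_nil this
  have hk0K : k0 ∈ PySem.Set.ofList vals := by rw [hK]; exact List.mem_cons_self
  have hk0 : k0 ∈ vals := (PySem.Set.mem_ofList vals k0).1 hk0K
  obtain ⟨p, hp, hpk⟩ := List.mem_map.mp hk0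
  have hlen0 : 0 < (chars k0).length := by
    rw [hchars]
    simp only [List.length_map, ← List.countP_eq_length_filter]
    rw [List.countP_pos_iff]
    exact ⟨p, hp, by simp [hpk]⟩
  -- A side: first step moves to (k0, chars k0); then the lex-max characterisation
  obtain ⟨a, ham, hafold, haall⟩ := pv_afold chars Kt k0
  -- B side: the sorted run scan
  set sl := PySem.List.sorted vals (fun v => v) false with hsl
  have hperm : sl.Perm vals := PySem.List.sorted_perm vals (fun v => v) false
  have hps : sl.Pairwise (· ≤ ·) := PySem.List.sorted_pairwise vals (fun v => v)
  have hslne : sl ≠ [] := by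
    intro h
    have := (PySem.List.sorted_eq_nil_iff vals (fun v => v) false).mp h
    rw [hvals, hits] at this
    simp at this
  rcases pv_run sl hps with ⟨h, _⟩ | ⟨bf, bl, u, rl, hrun, _, _, _, hbfm, hbl, hball⟩
  · exact absurd h hslne
  have hbfv : bf ∈ vals := hperm.mem_iff.mp hbfm
  have hcount : ∀ w, sl.count w = vals.count w := fun w => hperm.count_eq w
  -- the two selected frequencies coincide
  have haeq : a = bf := by
    have h1 : a ∈ PySem.Set.ofList vals := by
      rw [hK]; rcases ham with rfl | h <;> [exact List.mem_cons_self; exact List.mem_cons_of_mem _ h]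
    have h2 : bf ∈ PySem.Set.ofList vals := (PySem.Set.mem_ofList vals bf).2 hbfv
    have h3 := haall bf (by rw [hK] at h2; exact List.mem_cons.mp h2)
    have h4 := hball a (hperm.mem_iff.mpr ((PySem.Set.mem_ofList vals a).1 h1))
    rw [hcount] at h4 hbl
    have h5 := hlen a
    have h6 := hlen bf
    omega
  -- assemble
  rw [hitems, hK]
  simp only [List.map_cons, List.foldl_cons]
  rw [if_pos (Or.inl (by simpa using hlen0)), hafold]
  rw [← hsl] at *
  rw [hrun]
  simp only [haeq]
  rfl

theorem majorityGroup_eq (s : String) : majorityGroup s = majorityGroup_alt s := by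
  have h := pv_main (PySem.Dict.counter s.toList).items
  exact h

-- ===== VERDICT (by name: the statement is the Claim_ definition above) =====
theorem majorityGroup_spec : Claim_equal_majorityGroup := by
  intro s _
  exact majorityGroup_eq s
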